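-- pv_equiv track=rewrite | github.com/NUSTM/COQE | Baseline_Systems/data_utils/current_program_code.py | token_char_convert_to_token_bert
-- ===== SOURCE A (Python) =====
-- def token_char_convert_to_token_bert(bert_token_col, token_char, mapping_col):
--     """
--     :param bert_token_col: [n, sequence_length]
--     :param token_char: [token_length, char_length]
--     :param mapping_col: {bert_index: [char_index]}
--     :return: [token_length, bert_char_length]
--     """
--     assert len(token_char) == len(mapping_col), "[ERROR] data length error!"
--
--     bert_token_char = []
--     for index in range(len(token_char)):
--         seq_bert_token = bert_token_col[index]
--         seq_token_char = token_char[index]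
--         seq_map = mapping_col[index]
--
--         # token length denote ddparser tokenizer length
--         # char length denote bert_tokenizer char length
--         token_length, char_length = len(seq_token_char), len(seq_bert_token)
--         seq_matrix = [[0 for _ in range(char_length)] for _ in range(token_length)]
--
--         for i in range(token_length):
--             for char_index, bert_index in seq_map.items():
--                 # seq_map 中存在{char_index: bert_index} char_index == len(seq_token_char[i])的情况
--                 # char_index == len(seq_token_char[i])的情况，是为了处理 （s_index, e_index）中e_index 越界的情况
--                 if char_index > len(seq_token_char[i]) - 1:
--                     continue
--                 seq_matrix[i][bert_index] = max(seq_token_char[i][char_index], seq_matrix[i][bert_index])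
--
--         bert_token_char.append(seq_matrix)
--
--     return bert_token_char
-- ===== SOURCE B (Python) =====
-- def token_char_convert_to_token_bert(bert_token_col, token_char, mapping_col):
--     """Group the mapping by bert index once, then fill each row group-by-group."""
--     assert len(token_char) == len(mapping_col), "[ERROR] data length error!"
--
--     result = []
--     for index, seq_token_char in enumerate(token_char):
--         char_length = len(bert_token_col[index])
--
--         # invert {char_index: bert_index} into {bert_index: [char_index, ...]}
--         bert_to_chars = {}
--         for char_index, bert_index in mapping_col[index].items():
--             bert_to_chars.setdefault(bert_index, []).append(char_index)
--
--         seq_matrix = []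
--         for row in seq_token_char:
--             out_row = [0] * char_length
--             for bert_index, chars in bert_to_chars.items():
--                 vals = [row[c] for c in chars if c <= len(row) - 1]
--                 if vals:
--                     out_row[bert_index] = max(out_row[bert_index], max(vals))
--             seq_matrix.append(out_row)
--         result.append(seq_matrix)
--
--     return result
-- ===== Notes on version B (the rewrite author's own statement) =====
-- stated objective: alternative
-- what changed: B first inverts each sequence's {char_index: bert_index} mapping into a bert_index -> [char_index] grouping, then fills every output row group-by-group with one max per group, instead of A's flat rescan of the whole mapping for every token row with per-item max accumulation.
import Mathlib
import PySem

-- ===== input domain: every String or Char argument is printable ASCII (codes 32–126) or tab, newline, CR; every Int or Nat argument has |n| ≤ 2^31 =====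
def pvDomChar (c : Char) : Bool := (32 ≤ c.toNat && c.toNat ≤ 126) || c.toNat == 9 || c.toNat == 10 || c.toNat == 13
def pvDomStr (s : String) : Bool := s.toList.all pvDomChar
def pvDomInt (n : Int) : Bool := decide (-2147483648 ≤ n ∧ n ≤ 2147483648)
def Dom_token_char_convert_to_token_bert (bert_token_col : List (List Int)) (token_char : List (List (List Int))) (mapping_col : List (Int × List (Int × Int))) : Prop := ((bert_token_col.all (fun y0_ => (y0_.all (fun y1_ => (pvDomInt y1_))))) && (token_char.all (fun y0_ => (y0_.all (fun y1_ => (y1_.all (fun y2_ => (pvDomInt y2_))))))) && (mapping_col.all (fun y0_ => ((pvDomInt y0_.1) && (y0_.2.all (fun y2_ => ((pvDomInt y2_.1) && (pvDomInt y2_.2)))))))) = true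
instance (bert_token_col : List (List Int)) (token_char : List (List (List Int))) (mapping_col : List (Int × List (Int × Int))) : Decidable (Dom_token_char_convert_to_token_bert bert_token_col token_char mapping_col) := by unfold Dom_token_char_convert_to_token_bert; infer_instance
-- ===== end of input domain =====

-- B builds an inverted index bert_index → [char_index] once per sequence and fills each row
-- group-by-group with one max per group, instead of A's flat scan of the whole mapping per token
-- (objective: alternative decomposition; return value only — neither version mutates its arguments).

-- ===== PORT A =====
-- inner double loop of A for one token row i: scan all mapping items, accumulating max into the row
def pvARow (row : List Int) (char_length : Nat) (items : List (Int × Int)) : List Int :=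
  items.foldl (fun acc p =>
    if p.1 > PySem.List.len row - 1 then acc
    else PySem.List.pySetD acc p.2 (max (PySem.List.pyGetD row p.1 0) (PySem.List.pyGetD acc p.2 0)))
    (List.replicate char_length 0)

def token_char_convert_to_token_bert (bert_token_col : List (List Int)) (token_char : List (List (List Int))) (mapping_col : List (Int × List (Int × Int))) : List (List (List Int)) :=
  (PySem.List.pyRange 0 (PySem.List.len token_char) 1).map (fun index =>
    let seq_bert_token := PySem.List.pyGetD bert_token_col index []
    let seq_token_char := PySem.List.pyGetD token_char index []
    let seq_map := PySem.Dict.ofList ((PySem.Dict.ofList mapping_col).getD index [])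
    seq_token_char.map (fun row => pvARow row seq_bert_token.length seq_map.items))

-- ===== PORT B =====
-- bert_to_chars = {}; for c, b in mapping.items(): bert_to_chars.setdefault(b, []).append(c)
def pvGroupB (items : List (Int × Int)) : PySem.Dict Int (List Int) :=
  items.foldl (fun d p => d.modify p.2 [] (· ++ [p.1])) PySem.Dict.empty

-- one output row: for each group compute the max of its in-range chars and write it once
def pvBRow (row : List Int) (char_length : Nat) (groups : List (Int × List Int)) : List Int :=
  groups.foldl (fun out p =>
    match (p.2.filter (fun c => c ≤ PySem.List.len row - 1)).map (fun c => PySem.List.pyGetD row c 0) with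
    | [] => out
    | v :: vs => PySem.List.pySetD out p.1 (max (PySem.List.pyGetD out p.1 0) (vs.foldl max v)))
    (List.replicate char_length 0)

def token_char_convert_to_token_bert_alt (bert_token_col : List (List Int)) (token_char : List (List (List Int))) (mapping_col : List (Int × List (Int × Int))) : List (List (List Int)) :=
  (PySem.List.enumerate token_char).map (fun q =>
    let char_length := (PySem.List.pyGetD bert_token_col q.1 []).length
    let groups := pvGroupB (PySem.Dict.ofList ((PySem.Dict.ofList mapping_col).getD q.1 [])).items
    q.2.map (fun row => pvBRow row char_length groups.items))

-- ===== PRECONDITION & SPEC =====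
-- Pre_ excludes exactly the inputs where the Python A raises: a failed length assert, a missing
-- sequence key (KeyError/IndexError), or an out-of-range char/bert index actually reached.
def Pre_token_char_convert_to_token_bert (bert_token_col : List (List Int)) (token_char : List (List (List Int))) (mapping_col : List (Int × List (Int × Int))) : Prop :=
  (PySem.Dict.ofList mapping_col).size = token_char.length ∧
  token_char.length ≤ bert_token_col.length ∧
  ∀ index : Nat, index < token_char.length →
    (PySem.Dict.ofList mapping_col).contains (index : Int) = true ∧
    ∀ row ∈ token_char.getD index [],
      ∀ p ∈ (PySem.Dict.ofList ((PySem.Dict.ofList mapping_col).getD (index : Int) [])).items,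
        p.1 ≤ PySem.List.len row - 1 →
          PySem.Raise.InRange row.length p.1 ∧ PySem.Raise.InRange (bert_token_col.getD index []).length p.2
instance (bert_token_col : List (List Int)) (token_char : List (List (List Int))) (mapping_col : List (Int × List (Int × Int))) : Decidable (Pre_token_char_convert_to_token_bert bert_token_col token_char mapping_col) := by unfold Pre_token_char_convert_to_token_bert; infer_instance

def pvWitness_token_char_convert_to_token_bert : List (List Int) × List (List (List Int)) × (List (Int × List (Int × Int))) :=
  ([[0, 0]], [[[5, -3]]], [(0, [(0, 1), (1, 0), (2, 5)])])

def Spec_token_char_convert_to_token_bert (bert_token_col : List (List Int)) (token_char : List (List (List Int))) (mapping_col : List (Int × List (Int × Int))) (out : List (List (List Int))) : Prop := out = token_char_convert_to_token_bert_alt bert_token_col token_char mapping_col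
instance (bert_token_col : List (List Int)) (token_char : List (List (List Int))) (mapping_col : List (Int × List (Int × Int))) (out : List (List (List Int))) : Decidable (Spec_token_char_convert_to_token_bert bert_token_col token_char mapping_col out) := by unfold Spec_token_char_convert_to_token_bert; infer_instance

-- ===== CLAIM (what is proved, stated in full; the proofs are below) =====
def Claim_equal_token_char_convert_to_token_bert : Prop := ∀ (bert_token_col : List (List Int)) (token_char : List (List (List Int))) (mapping_col : List (Int × List (Int × Int))), Dom_token_char_convert_to_token_bert bert_token_col token_char mapping_col → Pre_token_char_convert_to_token_bert bert_token_col token_char mapping_col → Spec_token_char_convert_to_token_bert bert_token_col token_char mapping_col (token_char_convert_to_token_bert bert_token_col token_char mapping_col)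

-- ===== LEMMAS AND PROOFS =====

def pvNorm (n : Nat) (i : Int) : Nat := if 0 ≤ i then i.toNat else n - (-i).toNat
theorem pvNorm_lt {n : Nat} {i : Int} (h : PySem.Raise.InRange n i) : pvNorm n i < n := by
  rcases h with ⟨h1, h2⟩; unfold pvNorm; split <;> omega
theorem pyIdx_eq_norm {n : Nat} {i : Int} (h : PySem.Raise.InRange n i) :
    PySem.List.pyIdx? n i = some (pvNorm n i) := by
  rcases h with ⟨h1, h2⟩
  simp only [PySem.List.pyIdx?, pvNorm]
  by_cases hp : 0 ≤ i
  · rw [if_pos hp, if_pos (by omega), if_pos hp]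
  · rw [if_neg hp, if_pos (by omega), if_neg hp]
theorem pyGetD_norm {α : Type} (xs : List α) (i : Int) (d : α) (h : PySem.Raise.InRange xs.length i) :
    PySem.List.pyGetD xs i d = xs.getD (pvNorm xs.length i) d := by
  simp only [PySem.List.pyGetD, PySem.List.pyGet?, pyIdx_eq_norm h, Option.bind_some]
  rw [List.getD_eq_getElem?_getD]
theorem pySetD_norm {α : Type} (xs : List α) (i : Int) (v : α) (h : PySem.Raise.InRange xs.length i) :
    PySem.List.pySetD xs i v = xs.set (pvNorm xs.length i) v := by
  simp only [PySem.List.pySetD, PySem.List.pySet?, pyIdx_eq_norm h, Option.map_some, Option.getD_some]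
def pvHitsA (row : List Int) (clen : Nat) (j : Nat) (items : List (Int × Int)) : List Int :=
  (items.filter (fun p => decide (p.1 ≤ PySem.List.len row - 1) && decide (pvNorm clen p.2 = j))).map
    (fun p => PySem.List.pyGetD row p.1 0)

theorem afold_spec (row : List Int) (clen : Nat) (items : List (Int × Int)) :
    ∀ mat : List Int, mat.length = clen →
    (∀ p ∈ items, p.1 ≤ PySem.List.len row - 1 → PySem.Raise.InRange row.length p.1 ∧ PySem.Raise.InRange clen p.2) →
    (items.foldl (fun acc p =>
        if p.1 > PySem.List.len row - 1 then acc
        else PySem.List.pySetD acc p.2 (max (PySem.List.pyGetD row p.1 0) (PySem.List.pyGetD acc p.2 0))) mat).length = clen ∧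
    ∀ j : Nat, j < clen →
      (items.foldl (fun acc p =>
        if p.1 > PySem.List.len row - 1 then acc
        else PySem.List.pySetD acc p.2 (max (PySem.List.pyGetD row p.1 0) (PySem.List.pyGetD acc p.2 0))) mat).getD j 0
        = (pvHitsA row clen j items).foldl max (mat.getD j 0) := by
  induction items with
  | nil => intro mat hm _; exact ⟨hm, fun j hj => by simp [pvHitsA]⟩
  | cons p rest ih =>
    intro mat hm hyp
    simp only [List.foldl_cons]
    by_cases hc : p.1 > PySem.List.len row - 1
    · rw [if_pos hc]
      obtain ⟨l1, h1⟩ := ih mat hm (fun q hq => hyp q (List.mem_cons_of_mem _ hq))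
      refine ⟨l1, fun j hj => ?_⟩
      rw [h1 j hj]
      congr 1
      simp only [pvHitsA, List.filter_cons]
      have hcond : (decide (p.1 ≤ PySem.List.len row - 1) && decide (pvNorm clen p.2 = j)) = false := by
        simp only [Bool.and_eq_false_iff, decide_eq_false_iff_not]; left; omega
      simp only [hcond, Bool.false_eq_true, if_false]
    · rw [if_neg hc]
      rw [not_lt] at hc
      obtain ⟨hr, hb⟩ := hyp p (List.mem_cons_self) hc
      have hb' : PySem.Raise.InRange mat.length p.2 := by rw [hm]; exact hb
      set mat' := PySem.List.pySetD mat p.2 (max (PySem.List.pyGetD row p.1 0) (PySem.List.pyGetD mat p.2 0)) with hmat'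
      have hset : mat' = mat.set (pvNorm clen p.2) (max (PySem.List.pyGetD row p.1 0) (mat.getD (pvNorm clen p.2) 0)) := by
        rw [hmat', pySetD_norm mat p.2 _ hb', pyGetD_norm mat p.2 _ hb', hm]
      have hm' : mat'.length = clen := by rw [hset, List.length_set, hm]
      obtain ⟨l1, h1⟩ := ih mat' hm' (fun q hq => hyp q (List.mem_cons_of_mem _ hq))
      refine ⟨l1, fun j hj => ?_⟩
      rw [h1 j hj]
      simp only [pvHitsA, List.filter_cons]
      by_cases hjn : pvNorm clen p.2 = j
      · have hcond : (decide (p.1 ≤ PySem.List.len row - 1) && decide (pvNorm clen p.2 = j)) = true := by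
          simp only [Bool.and_eq_true, decide_eq_true_eq]
          exact ⟨hc, hjn⟩
        simp only [hcond, if_true, List.map_cons, List.foldl_cons]
        congr 1
        rw [hset, ← hjn,
            List.getD_eq_getElem _ _ (by rw [List.length_set, hm]; exact pvNorm_lt hb),
            List.getElem_set_self]
        exact max_comm _ _
      · have hcond : (decide (p.1 ≤ PySem.List.len row - 1) && decide (pvNorm clen p.2 = j)) = false := by
          simp [hjn]
        simp only [hcond, Bool.false_eq_true, if_false]
        congr 1
        rw [hset]
        rcases Nat.lt_or_ge j mat.length with hjm | hjm
        · rw [List.getD_eq_getElem _ _ (by rwa [List.length_set]),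
              List.getElem_set_ne (by omega), ← List.getD_eq_getElem _ _ hjm]
        · rw [List.getD_eq_default _ _ (by rwa [List.length_set]), List.getD_eq_default _ _ hjm]

def pvHitsB (row : List Int) (clen : Nat) (j : Nat) (gs : List (Int × List Int)) : List Int :=
  gs.flatMap (fun g =>
    if pvNorm clen g.1 = j then (g.2.filter (fun c => decide (c ≤ PySem.List.len row - 1))).map (fun c => PySem.List.pyGetD row c 0)
    else [])

theorem bfold_spec (row : List Int) (clen : Nat) (gs : List (Int × List Int)) :
    ∀ mat : List Int, mat.length = clen →
    (∀ g ∈ gs, ∀ c ∈ g.2, c ≤ PySem.List.len row - 1 → PySem.Raise.InRange row.length c ∧ PySem.Raise.InRange clen g.1) →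
    (gs.foldl (fun out p =>
        match (p.2.filter (fun c => c ≤ PySem.List.len row - 1)).map (fun c => PySem.List.pyGetD row c 0) with
        | [] => out
        | v :: vs => PySem.List.pySetD out p.1 (max (PySem.List.pyGetD out p.1 0) (vs.foldl max v))) mat).length = clen ∧
    ∀ j : Nat, j < clen →
      (gs.foldl (fun out p =>
        match (p.2.filter (fun c => c ≤ PySem.List.len row - 1)).map (fun c => PySem.List.pyGetD row c 0) with
        | [] => out
        | v :: vs => PySem.List.pySetD out p.1 (max (PySem.List.pyGetD out p.1 0) (vs.foldl max v))) mat).getD j 0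
        = (pvHitsB row clen j gs).foldl max (mat.getD j 0) := by
  induction gs with
  | nil => intro mat hm _; exact ⟨hm, fun j hj => by simp [pvHitsB]⟩
  | cons p rest ih =>
    intro mat hm hyp
    simp only [List.foldl_cons]
    rcases hv : (p.2.filter (fun c => decide (c ≤ PySem.List.len row - 1))).map (fun c => PySem.List.pyGetD row c 0) with _ | ⟨v, vs⟩
    · obtain ⟨l1, h1⟩ := ih mat hm (fun g hg => hyp g (List.mem_cons_of_mem _ hg))
      refine ⟨l1, fun j hj => ?_⟩
      rw [h1 j hj]
      congr 1
      simp only [pvHitsB, List.flatMap_cons, hv]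
      simp
    · have hne : p.2.filter (fun c => decide (c ≤ PySem.List.len row - 1)) ≠ [] := by
        intro h; rw [h] at hv; simp at hv
      obtain ⟨c, hcmem⟩ := List.exists_mem_of_ne_nil _ hne
      rw [List.mem_filter] at hcmem
      obtain ⟨hc2, hcle⟩ := hcmem
      have hcle' : c ≤ PySem.List.len row - 1 := by simpa using hcle
      have hb : PySem.Raise.InRange clen p.1 := (hyp p List.mem_cons_self c hc2 hcle').2
      have hb' : PySem.Raise.InRange mat.length p.1 := by rw [hm]; exact hb
      set M := vs.foldl max v with hM
      set mat' := PySem.List.pySetD mat p.1 (max (PySem.List.pyGetD mat p.1 0) M) with hmat'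
      have hset : mat' = mat.set (pvNorm clen p.1) (max (mat.getD (pvNorm clen p.1) 0) M) := by
        rw [hmat', pySetD_norm mat p.1 _ hb', pyGetD_norm mat p.1 _ hb', hm]
      have hm' : mat'.length = clen := by rw [hset, List.length_set, hm]
      obtain ⟨l1, h1⟩ := ih mat' hm' (fun g hg => hyp g (List.mem_cons_of_mem _ hg))
      refine ⟨l1, fun j hj => ?_⟩
      rw [h1 j hj]
      simp only [pvHitsB, List.flatMap_cons]
      by_cases hjn : pvNorm clen p.1 = j
      · rw [if_pos hjn, hv, List.foldl_append, List.foldl_cons]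
        congr 1
        rw [hset, ← hjn,
            List.getD_eq_getElem _ _ (by rw [List.length_set, hm]; exact pvNorm_lt hb),
            List.getElem_set_self, hM]
        haveI : Std.Associative (max : Int → Int → Int) := ⟨max_assoc⟩
        rw [List.foldl_assoc]
      · rw [if_neg hjn]
        simp only [List.nil_append]
        congr 1
        rw [hset]
        rcases Nat.lt_or_ge j mat.length with hjm | hjm
        · rw [List.getD_eq_getElem _ _ (by rwa [List.length_set]),
              List.getElem_set_ne (by omega), ← List.getD_eq_getElem _ _ hjm]
        · rw [List.getD_eq_default _ _ (by rwa [List.length_set]), List.getD_eq_default _ _ hjm]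

theorem foldl_max_congr_mem (a : Int) (l1 l2 : List Int) (h : ∀ x : Int, x ∈ l1 ↔ x ∈ l2) :
    l1.foldl max a = l2.foldl max a := by
  apply le_antisymm
  · rcases PySem.List.foldl_max_mem l1 a with h1 | h1
    · rw [h1]; exact (PySem.List.le_foldl_max l2 a).1
    · exact (PySem.List.le_foldl_max l2 a).2 _ ((h _).mp h1)
  · rcases PySem.List.foldl_max_mem l2 a with h1 | h1
    · rw [h1]; exact (PySem.List.le_foldl_max l1 a).1
    · exact (PySem.List.le_foldl_max l1 a).2 _ ((h _).mpr h1)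

theorem groupB_eq_swap (items : List (Int × Int)) :
    pvGroupB items = (items.map Prod.swap).foldl (fun d p => d.modify p.1 [] (· ++ [p.2])) PySem.Dict.empty := by
  rw [List.foldl_map]; rfl

theorem groupB_getD (items : List (Int × Int)) (b : Int) :
    (pvGroupB items).getD b [] = (items.filter (fun p => p.2 == b)).map (fun p => p.1) := by
  rw [groupB_eq_swap, PySem.Dict.getD_foldl_modify_append]
  simp only [PySem.Dict.getD_empty, List.filter_map, List.map_map, Function.comp_def, Prod.fst_swap, Prod.snd_swap, List.nil_append]

theorem groupB_nodup (items : List (Int × Int)) : (pvGroupB items).keys.Nodup := by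
  rw [groupB_eq_swap]
  exact PySem.Dict.nodup_keys_foldl_modify_key (items.map Prod.swap) (fun p => p.1) [] (fun _ p => (· ++ [p.2])) PySem.Dict.empty (by rw [PySem.Dict.keys_empty]; exact List.nodup_nil)

theorem groupB_keys_mem (items : List (Int × Int)) (b : Int) :
    b ∈ (pvGroupB items).keys ↔ b ∈ items.map (fun p => p.2) := by
  rw [groupB_eq_swap, PySem.Dict.keys_foldl_modify_key (items.map Prod.swap) (fun p => p.1) [] (fun _ p => (· ++ [p.2])) PySem.Dict.empty]
  rw [PySem.Set.mem_update, PySem.Dict.keys_empty]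
  simp [Prod.swap]

theorem groupB_mem_items (items : List (Int × Int)) (g : Int × List Int) :
    g ∈ (pvGroupB items).items ↔ g.1 ∈ items.map (fun p => p.2) ∧ g.2 = (items.filter (fun p => p.2 == g.1)).map (fun p => p.1) := by
  constructor
  · intro hg
    have hg' : (g.1, g.2) ∈ (pvGroupB items).items := by simpa using hg
    have h1 : g.1 ∈ (pvGroupB items).keys := PySem.Dict.mem_keys_of_mem_items _ hg'
    have h2 := PySem.Dict.getD_of_mem_items _ hg' (groupB_nodup items) []
    rw [groupB_getD] at h2
    exact ⟨(groupB_keys_mem items g.1).mp h1, h2.symm⟩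
  · rintro ⟨h1, h2⟩
    have hk : g.1 ∈ (pvGroupB items).keys := (groupB_keys_mem items g.1).mpr h1
    have := PySem.Dict.items_eq_map_keys (pvGroupB items) (groupB_nodup items) []
    rw [this, List.mem_map]
    exact ⟨g.1, hk, by rw [groupB_getD, ← h2]⟩

theorem groups_sound (row : List Int) (clen : Nat) (items : List (Int × Int))
    (hA : ∀ p ∈ items, p.1 ≤ PySem.List.len row - 1 → PySem.Raise.InRange row.length p.1 ∧ PySem.Raise.InRange clen p.2) :
    ∀ g ∈ (pvGroupB items).items, ∀ c ∈ g.2, c ≤ PySem.List.len row - 1 →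
      PySem.Raise.InRange row.length c ∧ PySem.Raise.InRange clen g.1 := by
  intro g hg c hc hcle
  obtain ⟨h1, h2⟩ := (groupB_mem_items items g).mp hg
  rw [h2, List.mem_map] at hc
  obtain ⟨p, hp, hpc⟩ := hc
  rw [List.mem_filter] at hp
  have hb : p.2 = g.1 := by simpa using hp.2
  have := hA p hp.1 (by rw [hpc]; exact hcle)
  rw [hpc, hb] at this
  exact this

theorem mem_hitsB_iff (row : List Int) (clen : Nat) (j : Nat) (items : List (Int × Int)) (x : Int) :
    x ∈ pvHitsB row clen j (pvGroupB items).items ↔ x ∈ pvHitsA row clen j items := by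
  simp only [pvHitsB, pvHitsA, List.mem_flatMap, List.mem_map, List.mem_filter,
    Bool.and_eq_true, decide_eq_true_eq]
  constructor
  · rintro ⟨g, hg, hx⟩
    obtain ⟨h1, h2⟩ := (groupB_mem_items items g).mp hg
    by_cases hjn : pvNorm clen g.1 = j
    · rw [if_pos hjn] at hx
      rw [List.mem_map] at hx
      obtain ⟨c, hc, hcx⟩ := hx
      rw [List.mem_filter] at hc
      obtain ⟨hc2, hcle⟩ := hc
      rw [h2, List.mem_map] at hc2
      obtain ⟨p, hp, hpc⟩ := hc2
      rw [List.mem_filter] at hp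
      have hb : p.2 = g.1 := by simpa using hp.2
      refine ⟨p, ⟨hp.1, ?_, ?_⟩, ?_⟩
      · rw [hpc]; simpa using hcle
      · rw [hb]; exact hjn
      · rw [hpc]; exact hcx
    · rw [if_neg hjn] at hx
      simp at hx
  · rintro ⟨p, ⟨hp, hple, hpj⟩, hx⟩
    refine ⟨(p.2, (items.filter (fun q => q.2 == p.2)).map (fun q => q.1)), ?_, ?_⟩
    · exact (groupB_mem_items items _).mpr ⟨List.mem_map.mpr ⟨p, hp, rfl⟩, rfl⟩
    · rw [if_pos hpj]
      rw [List.mem_map]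
      refine ⟨p.1, ?_, hx⟩
      rw [List.mem_filter]
      exact ⟨List.mem_map.mpr ⟨p, List.mem_filter.mpr ⟨hp, by simp⟩, rfl⟩, by simpa using hple⟩

theorem row_eq (row : List Int) (clen : Nat) (items : List (Int × Int))
    (hA : ∀ p ∈ items, p.1 ≤ PySem.List.len row - 1 → PySem.Raise.InRange row.length p.1 ∧ PySem.Raise.InRange clen p.2) :
    pvARow row clen items = pvBRow row clen (pvGroupB items).items := by
  have hlen : (List.replicate clen (0 : Int)).length = clen := List.length_replicate
  obtain ⟨la, ha⟩ := afold_spec row clen items (List.replicate clen 0) hlen hA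
  obtain ⟨lb, hb⟩ := bfold_spec row clen (pvGroupB items).items (List.replicate clen 0) hlen (groups_sound row clen items hA)
  apply List.ext_getElem (by rw [pvARow, pvBRow] at *; omega)
  intro j hj1 hj2
  have hjc : j < clen := by rw [pvARow] at *; omega
  have := (ha j hjc).trans ((foldl_max_congr_mem _ _ _ (fun x => (mem_hitsB_iff row clen j items x))).symm.trans (hb j hjc).symm)
  rw [pvARow, pvBRow] at *
  rw [List.getD_eq_getElem _ _ (by omega), List.getD_eq_getElem _ _ (by omega)] at this
  exact this

theorem outer_eq {γ : Type} (xs : List (List (List Int))) (s : Nat) (f : Int × List (List Int) → γ) (g : Int → γ)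
    (h : ∀ i : Nat, s ≤ i → i < s + xs.length → g (i : Int) = f ((i : Int), xs.getD (i - s) [])) :
    (PySem.List.pyRange (s : Int) ((s : Int) + xs.length)).map g = (PySem.List.enumerate xs (s : Int)).map f := by
  induction xs generalizing s with
  | nil =>
    rw [PySem.List.pyRange_one_eq_nil (a := (s : Int)) (b := (s : Int) + ((List.length (α := List (List Int)) []) : Int)) (by simp)]
    simp [PySem.List.enumerate]
  | cons y t ih =>
    rw [PySem.List.pyRange_one_cons (a := (s : Int)) (b := (s : Int) + (((y :: t).length : Nat) : Int)) (by simp only [List.length_cons]; push_cast; omega),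
        PySem.List.enumerate_cons]
    simp only [List.map_cons]
    congr 1
    · have := h s (le_refl s) (by simp)
      simpa using this
    · have e1 : ((s : Int) + 1) = ((s + 1 : Nat) : Int) := by push_cast; ring
      have e2 : ((s : Int) + (((y :: t).length : Nat) : Int)) = ((s + 1 : Nat) : Int) + ((t.length : Nat) : Int) := by
        simp only [List.length_cons]; push_cast; ring
      rw [e2, e1]
      apply ih (s + 1)
      intro i h1 h2
      have := h i (by omega) (by simp only [List.length_cons]; omega)
      rw [this]
      have e3 : i - s = (i - (s + 1)) + 1 := by omega
      rw [e3]
      simp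

-- ===== VERDICT (by name: the statement is the Claim_ definition above) =====
theorem token_char_convert_to_token_bert_spec : Claim_equal_token_char_convert_to_token_bert := by
  intro bert_token_col token_char mapping_col _ hpre
  obtain ⟨hsize, hblen, hidx⟩ := hpre
  show _ = _
  rw [token_char_convert_to_token_bert, token_char_convert_to_token_bert_alt]
  have h0 : (PySem.List.len token_char) = ((0 : Nat) : Int) + (token_char.length : Int) := by
    simp [PySem.List.len_eq]
  rw [h0]
  apply outer_eq token_char 0 _ _
  intro i _ hi
  simp only [Nat.zero_add] at hi
  simp only [Nat.sub_zero]
  simp only [PySem.List.pyGetD_natCast]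
  apply List.map_congr_left
  intro row hrow
  exact row_eq row _ _ (fun p hp hc => (hidx i hi).2 row hrow p hp hc)
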